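-- pv_equiv track=rewrite | github.com/kshirsagarsiddharth/Algorithms_and_Data_Structures | Graphs/DFS.py | dfs_i
-- ===== SOURCE A (Python) =====
-- def dfs_i(graph, start):
--     visited, stack = set(), [start]
--     while stack:
--         vertex = stack.pop()
--         if vertex not in visited:
--             visited.add(vertex)
--             stack.extend(graph[vertex] - visited)
--     return visited
-- ===== SOURCE B (Python) =====
-- def dfs_i(graph, start):
--     visited = set()
--
--     def visit(v):
--         if v in visited:
--             return
--         visited.add(v)
--         for n in graph[v]:
--             visit(n)
--
--     visit(start)
--     return visited
-- ===== Notes on version B (the rewrite author's own statement) =====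
-- stated objective: alternative
-- what changed: A's iterative DFS (explicit stack, re-popping and re-filtering with a set difference) is re-implemented as a recursive DFS with an inner visit(v) helper that marks v and recurses into its unvisited neighbours; both raise KeyError on exactly the same inputs (a vertex reachable from start missing from graph).
import Mathlib
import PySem

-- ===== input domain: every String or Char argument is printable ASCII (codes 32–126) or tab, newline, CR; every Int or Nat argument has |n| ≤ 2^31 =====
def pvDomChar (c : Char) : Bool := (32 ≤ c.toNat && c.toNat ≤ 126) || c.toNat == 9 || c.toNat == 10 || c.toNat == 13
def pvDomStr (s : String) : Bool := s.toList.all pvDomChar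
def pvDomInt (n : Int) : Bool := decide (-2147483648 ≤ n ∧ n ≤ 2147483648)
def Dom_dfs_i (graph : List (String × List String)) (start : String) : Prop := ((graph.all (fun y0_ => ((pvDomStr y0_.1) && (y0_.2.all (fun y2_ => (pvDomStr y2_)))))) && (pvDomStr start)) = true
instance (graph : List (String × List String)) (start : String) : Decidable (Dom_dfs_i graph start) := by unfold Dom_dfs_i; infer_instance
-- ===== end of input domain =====

-- B re-implements A's iterative stack-DFS as a recursive DFS (inner `visit` helper); same returned set.

-- number of graph keys not yet visited: the termination-measure component used by port A
def pvUnvis (graph : List (String × List String)) (vis : PySem.Set String) : Nat :=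
  ((graph.map Prod.fst).filter (fun k => decide (k ∉ vis))).length

-- termination helper for port A: visiting an unvisited key strictly shrinks the measure
theorem pvFilter_lt {α : Type} (p q : α → Bool) (l : List α)
    (himp : ∀ x, p x = true → q x = true) (a : α) (ha : a ∈ l)
    (hq : q a = true) (hp : p a = false) :
    (l.filter p).length < (l.filter q).length := by
  induction l with
  | nil => cases ha
  | cons x xs ih =>
    rcases List.mem_cons.1 ha with rfl | hmem
    · have hle : (xs.filter p).length ≤ (xs.filter q).length :=
        (List.monotone_filter_right xs himp).length_le
      simp [List.filter, hp, hq]; omega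
    · cases hpx : p x with
      | true => simpa [List.filter, hpx, himp x hpx] using ih hmem
      | false =>
        have hlt := ih hmem
        cases hqx : q x with
        | true => simp [List.filter, hpx, hqx]; omega
        | false => simpa [List.filter, hpx, hqx] using hlt

theorem pvUnvis_lt (graph : List (String × List String)) (vis : PySem.Set String) (v : String)
    (hk : v ∈ graph.map Prod.fst) (hv : v ∉ vis) :
    pvUnvis graph (PySem.Set.add vis v) < pvUnvis graph vis := by
  refine pvFilter_lt _ _ _ ?_ v hk ?_ ?_
  · intro x hx
    simp only [decide_eq_true_eq] at hx ⊢
    intro hm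
    exact hx ((PySem.Set.mem_add vis v x).2 (Or.inl hm))
  · simp [hv]
  · simp [(PySem.Set.mem_add vis v v).2 (Or.inr rfl)]

-- ===== PORT A =====
-- while stack: vertex = stack.pop(); if vertex not in visited: visited.add(vertex);
--              stack.extend(graph[vertex] - visited)
-- The set difference `graph[vertex] - visited` is iterated in unspecified (hash) order in
-- Python; the port extends the stack with its elements in reverse insertion order (the returned
-- SET does not depend on that choice).  `graph[vertex]` on a missing key raises KeyError
-- (excluded by Pre_).
def dfsLoopA (graph : List (String × List String)) (vis : PySem.Set String) (st : List String) :
    PySem.Set String :=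
  match hst : st.getLast? with
  | none => vis                                    -- while stack: loop ends
  | some vertex =>
    if vertex ∉ vis then
      let vis' := PySem.Set.add vis vertex         -- visited.add(vertex)
      match hg : (PySem.Dict.mk graph).get? vertex with
      | none => vis'                               -- Python raises KeyError here (outside Pre_)
      | some ns =>
          dfsLoopA graph vis' (st.dropLast ++ (PySem.Set.diff (PySem.Set.ofList ns) vis').reverse)
    else dfsLoopA graph vis st.dropLast
termination_by (pvUnvis graph vis, st.length)
decreasing_by
  · apply Prod.Lex.left
    apply pvUnvis_lt
    · have : vertex ∈ (PySem.Dict.mk graph).keys := by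
        by_contra hn
        rw [← PySem.Dict.get?_eq_none_iff_not_mem_keys] at hn
        simp [hg] at hn
      simpa [PySem.Dict.keys_mk] using this
    · assumption
  · apply Prod.Lex.right
    have hne : st ≠ [] := by intro h; subst h; simp at hst
    have := List.length_pos_of_ne_nil hne
    simp [List.length_dropLast]; omega

def dfs_i (graph : List (String × List String)) (start : String) : List String :=
  dfsLoopA graph PySem.Set.empty [start]

-- ===== PORT B =====
-- def visit(v): if v in visited: return; visited.add(v); for n in graph[v]: visit(n)
-- `for n in graph[v]` iterates a Python set in unspecified (hash) order; the port iterates it in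
-- insertion order (the returned SET does not depend on that choice).  `graph[v]` on a missing
-- key raises KeyError (excluded by Pre_).  The Nat argument is a fuel totality guard only:
-- dfs_i_alt passes graph.length + 1 and the proofs below show it is never exhausted.
mutual
def dfsVisitB (graph : List (String × List String)) (f : Nat) (vis : PySem.Set String)
    (v : String) : PySem.Set String :=
  match f with
  | 0 => vis
  | f + 1 =>
    if v ∈ vis then vis                            -- if v in visited: return
    else
      let vis' := PySem.Set.add vis v              -- visited.add(v)
      match (PySem.Dict.mk graph).get? v with
      | none => vis'                               -- Python raises KeyError here (outside Pre_)
      | some ns => dfsForB graph f vis' (PySem.Set.ofList ns)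
termination_by (f, 0)
decreasing_by apply Prod.Lex.left; omega

def dfsForB (graph : List (String × List String)) (f : Nat) (vis : PySem.Set String)
    (l : List String) : PySem.Set String :=        -- for n in graph[v]: visit(n)
  match l with
  | [] => vis
  | n :: t => dfsForB graph f (dfsVisitB graph f vis n) t
termination_by (f, l.length + 1)
decreasing_by
  · apply Prod.Lex.right; simp
  · apply Prod.Lex.right; simp
end

def dfs_i_alt (graph : List (String × List String)) (start : String) : List String :=
  dfsVisitB graph (graph.length + 1) PySem.Set.empty start

-- ===== PRECONDITION & SPEC =====
-- the vertices reachable from start: (graph.length + 1)-fold iteration of the one-step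
-- neighbour expansion, which is proved below (pvReach_closed) to have reached its fixpoint
def pvExpand (graph : List (String × List String)) (S : PySem.Set String) : PySem.Set String :=
  S.foldl (fun acc v =>
    match (PySem.Dict.mk graph).get? v with
    | none => acc
    | some ns => ns.foldl PySem.Set.add acc) S

def pvReach (graph : List (String × List String)) (start : String) : PySem.Set String :=
  (pvExpand graph)^[graph.length + 1] (PySem.Set.add PySem.Set.empty start)

-- Pre_ excludes exactly the inputs on which the Python A raises a KeyError: those where some
-- vertex reachable from start (including start itself) is not a key of graph.  B raises there too.
def Pre_dfs_i (graph : List (String × List String)) (start : String) : Prop :=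
  ∀ v ∈ pvReach graph start, v ∈ graph.map Prod.fst
instance (graph : List (String × List String)) (start : String) : Decidable (Pre_dfs_i graph start) := by
  unfold Pre_dfs_i; infer_instance

def pvWitness_dfs_i : (List (String × List String)) × String :=
  ([("a", ["b"]), ("b", ["a"]), ("c", ["d"])], "a")

def Spec_dfs_i (graph : List (String × List String)) (start : String) (out : List String) : Prop := out = dfs_i_alt graph start
instance (graph : List (String × List String)) (start : String) (out : List String) : Decidable (Spec_dfs_i graph start out) := by unfold Spec_dfs_i; infer_instance

-- ===== CLAIM (what is proved, stated in full; the proofs are below) =====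
def Claim_equal_dfs_i : Prop := ∀ (graph : List (String × List String)) (start : String), Dom_dfs_i graph start → Pre_dfs_i graph start → Spec_dfs_i graph start (dfs_i graph start)

-- ===== LEMMAS AND PROOFS =====

-- a get? hit means the key occurs in the graph
theorem pvKey_of_get (graph : List (String × List String)) (v : String)
    (ns : List String) (hg : (PySem.Dict.mk graph).get? v = some ns) :
    v ∈ graph.map Prod.fst := by
  have : v ∈ (PySem.Dict.mk graph).keys := by
    by_contra hn
    rw [← PySem.Dict.get?_eq_none_iff_not_mem_keys] at hn
    simp [hg] at hn
  simpa [PySem.Dict.keys_mk] using this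

-- membership in a fold of Set.add
theorem pvMem_foldl_add (ns : List String) :
    ∀ (acc : PySem.Set String) (x : String),
      x ∈ ns.foldl PySem.Set.add acc ↔ x ∈ acc ∨ x ∈ ns := by
  induction ns with
  | nil => intro acc x; simp [List.foldl]
  | cons n t ih =>
    intro acc x
    rw [List.foldl_cons, ih, PySem.Set.mem_add]
    simp [or_assoc]

-- characterisation of one expansion step
theorem pvMem_expand_aux (graph : List (String × List String)) (l : List String) :
    ∀ (acc : PySem.Set String) (x : String),
      x ∈ l.foldl (fun acc v =>
          match (PySem.Dict.mk graph).get? v with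
          | none => acc
          | some ns => ns.foldl PySem.Set.add acc) acc ↔
        x ∈ acc ∨ ∃ v ∈ l, ∃ ns, (PySem.Dict.mk graph).get? v = some ns ∧ x ∈ ns := by
  induction l with
  | nil => intro acc x; simp [List.foldl]
  | cons v t ih =>
    intro acc x
    rw [List.foldl_cons]
    cases hg : (PySem.Dict.mk graph).get? v with
    | none =>
      simp only [hg, ih]
      constructor
      · rintro (h | ⟨w, hw, ns, hns, hx⟩)
        · exact Or.inl h
        · exact Or.inr ⟨w, List.mem_cons_of_mem v hw, ns, hns, hx⟩
      · rintro (h | ⟨w, hw, ns, hns, hx⟩)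
        · exact Or.inl h
        · rcases List.mem_cons.1 hw with rfl | hw'
          · rw [hg] at hns; cases hns
          · exact Or.inr ⟨w, hw', ns, hns, hx⟩
    | some ns0 =>
      simp only [hg, ih, pvMem_foldl_add]
      constructor
      · rintro ((h | h) | ⟨w, hw, ns, hns, hx⟩)
        · exact Or.inl h
        · exact Or.inr ⟨v, List.mem_cons_self, ns0, hg, h⟩
        · exact Or.inr ⟨w, List.mem_cons_of_mem v hw, ns, hns, hx⟩
      · rintro (h | ⟨w, hw, ns, hns, hx⟩)
        · exact Or.inl (Or.inl h)
        · rcases List.mem_cons.1 hw with rfl | hw'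
          · rw [hg] at hns; injection hns with h2; subst h2
            exact Or.inl (Or.inr hx)
          · exact Or.inr ⟨w, hw', ns, hns, hx⟩

theorem pvMem_expand (graph : List (String × List String)) (S : PySem.Set String) (x : String) :
    x ∈ pvExpand graph S ↔
      x ∈ S ∨ ∃ v ∈ S, ∃ ns, (PySem.Dict.mk graph).get? v = some ns ∧ x ∈ ns := by
  unfold pvExpand
  exact pvMem_expand_aux graph S S x

theorem pvExpand_mono (graph : List (String × List String)) (S : PySem.Set String)
    (x : String) (hx : x ∈ S) : x ∈ pvExpand graph S :=
  (pvMem_expand graph S x).2 (Or.inl hx)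

theorem pvExpand_congr (graph : List (String × List String)) (S T : PySem.Set String)
    (h : ∀ x, x ∈ S ↔ x ∈ T) (x : String) :
    x ∈ pvExpand graph S ↔ x ∈ pvExpand graph T := by
  rw [pvMem_expand, pvMem_expand, h x]
  constructor <;> rintro (hx | ⟨v, hv, ns, hns, hxn⟩)
  · exact Or.inl hx
  · exact Or.inr ⟨v, (h v).1 hv, ns, hns, hxn⟩
  · exact Or.inl hx
  · exact Or.inr ⟨v, (h v).2 hv, ns, hns, hxn⟩

theorem pvIter_congr (graph : List (String × List String)) :
    ∀ (m : Nat) (S T : PySem.Set String), (∀ x, x ∈ S ↔ x ∈ T) →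
      ∀ x, x ∈ (pvExpand graph)^[m] S ↔ x ∈ (pvExpand graph)^[m] T := by
  intro m
  induction m with
  | zero => intro S T h x; simpa using h x
  | succ m ih =>
    intro S T h x
    rw [Function.iterate_succ_apply, Function.iterate_succ_apply]
    exact ih _ _ (pvExpand_congr graph S T h) x

-- an expansion fixpoint is a fixpoint of every iterate
theorem pvIter_stable (graph : List (String × List String)) (T : PySem.Set String)
    (hfix : ∀ x, x ∈ pvExpand graph T ↔ x ∈ T) :
    ∀ (m : Nat) (x : String), x ∈ (pvExpand graph)^[m] T ↔ x ∈ T := by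
  intro m
  induction m with
  | zero => intro x; simp
  | succ m ih =>
    intro x
    rw [Function.iterate_succ_apply]
    exact (pvIter_congr graph m _ _ hfix x).trans (ih x)

-- number of distinct keys already in S — bounded by graph.length, grows while not stabilised
def pvKC (graph : List (String × List String)) (S : PySem.Set String) : Nat :=
  ((graph.map Prod.fst).dedup.filter (fun k => decide (k ∈ S))).length

theorem pvKC_le (graph : List (String × List String)) (S : PySem.Set String) :
    pvKC graph S ≤ graph.length := by
  calc ((graph.map Prod.fst).dedup.filter (fun k => decide (k ∈ S))).length
      ≤ (graph.map Prod.fst).dedup.length := List.length_filter_le _ _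
    _ ≤ (graph.map Prod.fst).length := (List.dedup_sublist _).length_le
    _ = graph.length := List.length_map ..

-- after enough iterations the expansion has reached a fixpoint
theorem pvFix (graph : List (String × List String)) :
    ∀ (n : Nat) (S : PySem.Set String), graph.length < pvKC graph S + n →
      ∀ x, x ∈ pvExpand graph ((pvExpand graph)^[n] S) ↔ x ∈ (pvExpand graph)^[n] S := by
  intro n
  induction n with
  | zero =>
    intro S h
    have := pvKC_le graph S
    omega
  | succ n ih =>
    intro S h x
    by_cases hstab : ∀ k ∈ graph.map Prod.fst, k ∈ pvExpand graph S → k ∈ S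
    · -- already stabilised: pvExpand S is a fixpoint
      have hfix : ∀ y, y ∈ pvExpand graph (pvExpand graph S) ↔ y ∈ pvExpand graph S := by
        intro y
        constructor
        · intro hy
          rcases (pvMem_expand graph _ y).1 hy with hy' | ⟨v, hv, ns, hns, hyn⟩
          · exact hy'
          · have hvS : v ∈ S := hstab v (pvKey_of_get graph v ns hns) hv
            exact (pvMem_expand graph S y).2 (Or.inr ⟨v, hvS, ns, hns, hyn⟩)
        · exact pvExpand_mono graph _ y
      rw [Function.iterate_succ_apply]
      have h1 := pvIter_stable graph (pvExpand graph S) hfix n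
      exact ((pvExpand_congr graph _ _ h1 x).trans ((hfix x).trans (h1 x).symm))
    · -- a new key appears: the key count strictly grows
      push_neg at hstab
      obtain ⟨k, hk, hkf, hknS⟩ := hstab
      have hlt : pvKC graph S < pvKC graph (pvExpand graph S) := by
        refine pvFilter_lt _ _ _ ?_ k (List.mem_dedup.2 hk) ?_ ?_
        · intro y hy
          simp only [decide_eq_true_eq] at hy ⊢
          exact pvExpand_mono graph S y hy
        · simp [hkf]
        · simp [hknS]
      rw [Function.iterate_succ_apply]
      exact ih (pvExpand graph S) (by omega) x

theorem pvReach_closed (graph : List (String × List String)) (start : String)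
    (v : String) (hv : v ∈ pvReach graph start) (ns : List String)
    (hg : (PySem.Dict.mk graph).get? v = some ns) (n : String) (hn : n ∈ ns) :
    n ∈ pvReach graph start := by
  have hfix := pvFix graph (graph.length + 1) (PySem.Set.add PySem.Set.empty start)
    (by omega) n
  unfold pvReach
  exact hfix.1 ((pvMem_expand graph _ n).2 (Or.inr ⟨v, hv, ns, hg, hn⟩))

theorem pvStart_mem_reach (graph : List (String × List String)) (start : String) :
    start ∈ pvReach graph start := by
  unfold pvReach
  have h0 : start ∈ PySem.Set.add PySem.Set.empty start :=
    (PySem.Set.mem_add _ _ _).2 (Or.inr rfl)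
  generalize (graph.length + 1) = m
  induction m with
  | zero => simpa using h0
  | succ m ih =>
    rw [Function.iterate_succ_apply']
    exact pvExpand_mono graph _ start ih

-- unfolding equations for port A's loop (its match is dependent, so `simp` cannot step it)
theorem dfsLoopA_nil (graph : List (String × List String)) (vis : PySem.Set String) :
    dfsLoopA graph vis [] = vis := by
  rw [dfsLoopA]
  rfl

theorem dfsLoopA_concat_mem (graph : List (String × List String)) (vis : PySem.Set String)
    (st : List String) (n : String) (hn : n ∈ vis) :
    dfsLoopA graph vis (st ++ [n]) = dfsLoopA graph vis st := by
  rw [dfsLoopA]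
  split
  · next heq => rw [List.getLast?_concat] at heq; cases heq
  · next vertex heq =>
    rw [List.getLast?_concat] at heq
    injection heq with h
    subst h
    rw [if_neg (not_not_intro hn), List.dropLast_concat]

theorem dfsLoopA_concat_new (graph : List (String × List String)) (vis : PySem.Set String)
    (st : List String) (n : String) (ns : List String) (hn : n ∉ vis)
    (hg : (PySem.Dict.mk graph).get? n = some ns) :
    dfsLoopA graph vis (st ++ [n]) =
      dfsLoopA graph (PySem.Set.add vis n)
        (st ++ (PySem.Set.diff (PySem.Set.ofList ns) (PySem.Set.add vis n)).reverse) := by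
  rw [dfsLoopA]
  split
  · next heq => rw [List.getLast?_concat] at heq; cases heq
  · next vertex heq =>
    rw [List.getLast?_concat] at heq
    injection heq with h
    subst h
    rw [if_pos hn]
    split
    · next heq2 => rw [hg] at heq2; cases heq2
    · next ns2 heq2 =>
      rw [hg] at heq2
      injection heq2 with h2
      subst h2
      rw [List.dropLast_concat]

-- visiting an already-visited vertex is a no-op
theorem pvVisitB_of_mem (graph : List (String × List String)) (f : Nat)
    (vis : PySem.Set String) (v : String) (h : v ∈ vis) :
    dfsVisitB graph f vis v = vis := by
  cases f <;> simp [dfsVisitB, h]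

-- the for-loop over an appended list is the composition of the two loops
theorem pvForB_append (graph : List (String × List String)) (f : Nat)
    (a b : List String) (vis : PySem.Set String) :
    dfsForB graph f vis (a ++ b) = dfsForB graph f (dfsForB graph f vis a) b := by
  induction a generalizing vis with
  | nil => simp [dfsForB]
  | cons x xs ih => simp [dfsForB, ih]

-- the visited set only grows
theorem pvForB_mono_of (graph : List (String × List String)) (f : Nat)
    (hV : ∀ (vis : PySem.Set String) (v x : String), x ∈ vis → x ∈ dfsVisitB graph f vis v) :
    ∀ (l : List String) (vis : PySem.Set String) (x : String),
      x ∈ vis → x ∈ dfsForB graph f vis l := by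
  intro l
  induction l with
  | nil => intro vis x hx; simpa [dfsForB] using hx
  | cons n t ih =>
    intro vis x hx
    rw [dfsForB]
    exact ih _ _ (hV vis n x hx)

theorem pvVisitB_mono (graph : List (String × List String)) :
    ∀ (f : Nat) (vis : PySem.Set String) (v x : String),
      x ∈ vis → x ∈ dfsVisitB graph f vis v := by
  intro f
  induction f with
  | zero => intro vis v x hx; simpa [dfsVisitB] using hx
  | succ f ih =>
    intro vis v x hx
    by_cases hv : v ∈ vis
    · simpa [dfsVisitB, hv] using hx
    · have hx' : x ∈ PySem.Set.add vis v := (PySem.Set.mem_add vis v x).2 (Or.inl hx)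
      cases hg : (PySem.Dict.mk graph).get? v with
      | none => simpa [dfsVisitB, hv, hg] using hx'
      | some ns =>
        simp only [dfsVisitB, hv, hg]
        exact pvForB_mono_of graph f ih _ _ _ hx'

theorem pvUnvis_mono (graph : List (String × List String)) (vis vis2 : PySem.Set String)
    (h : ∀ x ∈ vis, x ∈ vis2) : pvUnvis graph vis2 ≤ pvUnvis graph vis := by
  apply List.Sublist.length_le
  apply List.monotone_filter_right
  intro x hx
  simp only [decide_eq_true_eq] at hx ⊢
  intro hm
  exact hx (h x hm)

-- neighbours already visited may be dropped from the loop's list: visit skips them anyway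
theorem pvForB_filter (graph : List (String × List String)) (f : Nat) :
    ∀ (xs : List String) (vis vis0 : PySem.Set String), (∀ x ∈ vis0, x ∈ vis) →
      dfsForB graph f vis (xs.filter (fun x => !(PySem.Set.contains vis0 x))) =
        dfsForB graph f vis xs := by
  intro xs
  induction xs with
  | nil => intro vis vis0 _; rfl
  | cons x t ih =>
    intro vis vis0 hsub
    cases hc : PySem.Set.contains vis0 x with
    | true =>
      have hxv : x ∈ vis := hsub x ((PySem.Set.contains_iff vis0 x).1 hc)
      simp only [List.filter, hc, Bool.not_true, dfsForB, pvVisitB_of_mem graph f vis x hxv]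
      exact ih vis vis0 hsub
    | false =>
      simp only [List.filter, hc, Bool.not_false, dfsForB]
      exact ih _ vis0 (fun y hy => pvVisitB_mono graph f vis x y (hsub y hy))

-- with enough fuel the result does not depend on the exact fuel value
theorem pvForB_irrel_of (graph : List (String × List String)) (f g : Nat)
    (hV : ∀ (vis : PySem.Set String) (v : String), pvUnvis graph vis < f →
      pvUnvis graph vis < g → dfsVisitB graph f vis v = dfsVisitB graph g vis v) :
    ∀ (l : List String) (vis : PySem.Set String), pvUnvis graph vis < f →
      pvUnvis graph vis < g → dfsForB graph f vis l = dfsForB graph g vis l := by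
  intro l
  induction l with
  | nil => intro vis _ _; rw [dfsForB, dfsForB]
  | cons n t ih =>
    intro vis hf hg
    have h1 := hV vis n hf hg
    have hmono : pvUnvis graph (dfsVisitB graph g vis n) ≤ pvUnvis graph vis :=
      pvUnvis_mono graph vis _ (fun x hx => pvVisitB_mono graph g vis n x hx)
    rw [dfsForB, dfsForB, h1]
    exact ih _ (by omega) (by omega)

theorem pvVisitB_irrel (graph : List (String × List String)) :
    ∀ (f g : Nat) (vis : PySem.Set String) (v : String), pvUnvis graph vis < f →
      pvUnvis graph vis < g → dfsVisitB graph f vis v = dfsVisitB graph g vis v := by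
  intro f
  induction f with
  | zero => intro g vis v hf _; omega
  | succ f ih =>
    intro g vis v hf hg
    obtain ⟨g', rfl⟩ : ∃ g', g = g' + 1 := ⟨g - 1, by omega⟩
    by_cases hv : v ∈ vis
    · simp [dfsVisitB, hv]
    · cases hg' : (PySem.Dict.mk graph).get? v with
      | none => simp [dfsVisitB, hv, hg']
      | some ns =>
        simp only [dfsVisitB, if_neg hv, hg']
        have hk : v ∈ graph.map Prod.fst := pvKey_of_get graph v ns hg'
        have hlt : pvUnvis graph (PySem.Set.add vis v) < pvUnvis graph vis :=
          pvUnvis_lt graph vis v hk hv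
        exact pvForB_irrel_of graph f g' (fun vis' v' h1 h2 => ih g' vis' v' h1 h2)
          _ _ (by omega) (by omega)

-- MAIN: running A's loop on a stack whose top (rightmost) segment is l.reverse is the same as
-- first recursively visiting l (left to right) and then continuing with the rest of the stack;
-- R is any set of vertices that is closed under neighbours and consists of graph keys
theorem pvMain (graph : List (String × List String)) (R : PySem.Set String)
    (hkey : ∀ v ∈ R, v ∈ graph.map Prod.fst)
    (hcl : ∀ v ∈ R, ∀ ns, (PySem.Dict.mk graph).get? v = some ns → ∀ n ∈ ns, n ∈ R) :
    ∀ (f : Nat) (vis : PySem.Set String) (st l : List String),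
      pvUnvis graph vis < f → (∀ v ∈ l, v ∈ R) →
      dfsLoopA graph vis (st ++ l.reverse) = dfsLoopA graph (dfsForB graph f vis l) st
  | f, vis, st, [] => by
    intro _ _
    rw [dfsForB]
    simp
  | f, vis, st, n :: t => by
    intro hf hl
    have hrw : st ++ (n :: t).reverse = (st ++ t.reverse) ++ [n] := by simp
    rw [hrw]
    by_cases hn : n ∈ vis
    · rw [dfsLoopA_concat_mem graph vis _ n hn,
        pvMain graph R hkey hcl f vis st t hf (fun v hv => hl v (List.mem_cons_of_mem n hv)),
        dfsForB, pvVisitB_of_mem graph f vis n hn]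
    · have hnR : n ∈ R := hl n List.mem_cons_self
      have hk : n ∈ graph.map Prod.fst := hkey n hnR
      cases hg : (PySem.Dict.mk graph).get? n with
      | none =>
        exfalso
        rw [PySem.Dict.get?_eq_none_iff_not_mem_keys] at hg
        exact hg (by simpa [PySem.Dict.keys_mk] using hk)
      | some ns =>
        rw [dfsLoopA_concat_new graph vis _ n ns hn hg]
        have hlt : pvUnvis graph (PySem.Set.add vis n) < pvUnvis graph vis :=
          pvUnvis_lt graph vis n hk hn
        set vis' := PySem.Set.add vis n with hvis'
        set F := PySem.Set.diff (PySem.Set.ofList ns) vis' with hF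
        have hrw2 : (st ++ t.reverse) ++ F.reverse = st ++ (F ++ t).reverse := by simp
        rw [hrw2]
        rw [pvMain graph R hkey hcl f vis' st (F ++ t) (by omega) ?mem]
        case mem =>
          intro v hv
          rcases List.mem_append.1 hv with hv1 | hv2
          · have : v ∈ PySem.Set.ofList ns := (List.mem_filter.1 hv1).1
            exact hcl n hnR ns hg v ((PySem.Set.mem_ofList ns v).1 this)
          · exact hl v (List.mem_cons_of_mem n hv2)
        obtain ⟨f', rfl⟩ : ∃ f', f = f' + 1 := ⟨f - 1, by omega⟩
        have hBstep : dfsForB graph (f' + 1) vis (n :: t) =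
            dfsForB graph (f' + 1) (dfsForB graph f' vis' (PySem.Set.ofList ns)) t := by
          rw [dfsForB]
          congr 1
          rw [dfsVisitB]
          simp only [if_neg hn, hg, ← hvis']
        have hinner : dfsForB graph (f' + 1) vis' F = dfsForB graph f' vis' (PySem.Set.ofList ns) := by
          rw [hF]
          rw [show PySem.Set.diff (PySem.Set.ofList ns) vis' =
            (PySem.Set.ofList ns).filter (fun x => !(PySem.Set.contains vis' x)) from rfl]
          rw [pvForB_filter graph (f' + 1) (PySem.Set.ofList ns) vis' vis' (fun x hx => hx)]
          exact pvForB_irrel_of graph (f' + 1) f'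
            (fun vis2 v2 h1 h2 => pvVisitB_irrel graph (f' + 1) f' vis2 v2 h1 h2)
            (PySem.Set.ofList ns) vis' (by omega) (by omega)
        rw [hBstep, pvForB_append, hinner]
  termination_by _f vis _st l => (pvUnvis graph vis, l.length)
  decreasing_by
  · apply Prod.Lex.right; simp only [List.length_cons]; omega
  · apply Prod.Lex.left; omega

-- ===== VERDICT (by name: the statement is the Claim_ definition above) =====
theorem dfs_i_spec : Claim_equal_dfs_i := by
  unfold Claim_equal_dfs_i
  intro graph start _ hpre
  unfold Spec_dfs_i dfs_i dfs_i_alt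
  have hfuel : pvUnvis graph PySem.Set.empty < graph.length + 1 := by
    have h1 : pvUnvis graph PySem.Set.empty ≤ (graph.map Prod.fst).length :=
      List.length_filter_le _ _
    have h2 : (graph.map Prod.fst).length = graph.length := List.length_map ..
    omega
  have hm := pvMain graph (pvReach graph start) hpre
    (fun v hv ns hg n hn => pvReach_closed graph start v hv ns hg n hn)
    (graph.length + 1) PySem.Set.empty [] [start] hfuel
    (by intro v hv; rw [List.mem_singleton.1 hv]; exact pvStart_mem_reach graph start)
  simp only [List.nil_append, List.reverse_cons, List.reverse_nil] at hm
  rw [hm, dfsLoopA_nil, dfsForB, dfsForB]
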